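-- pv_equiv track=rewrite | github.com/Me-k-01/Voyageur-de-commerce | algo_four.py | index_max
-- ===== SOURCE A (Python) =====
-- def index_max(arr, exclude_indices): # retourne l'indice dont la valeur est maximal, et qui n'est pas dans exclude_indices
--     # On n'explore pas a partir du premier, au cas où l'élément 0 fait partir de exclude_indices
--     best_i = None
--     for i in range(len(arr)):
--         if best_i == None:
--             if i not in exclude_indices:
--                 best_i = i
--             continue
--
--         if arr[best_i] < arr[i] and i not in exclude_indices:
--             best_i = i
--
--     return best_i
-- ===== SOURCE B (Python) =====
-- def index_max(arr, exclude_indices):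
--     # Divide and conquer: best admissible index of each half, combined with a
--     # strict-< comparison (ties keep the left half, i.e. the smaller index).
--     def best(lo, hi):
--         if hi <= lo:
--             return None
--         if hi - lo == 1:
--             return lo if lo not in exclude_indices else None
--         mid = (lo + hi) // 2
--         l = best(lo, mid)
--         r = best(mid, hi)
--         if l is None:
--             return r
--         if r is None:
--             return l
--         return r if arr[l] < arr[r] else l
--     return best(0, len(arr))
-- ===== Notes on version B (the rewrite author's own statement) =====
-- stated objective: alternative
-- what changed: Replaces A's single left-to-right stateful scan with a running best index by a divide-and-conquer recursion on index intervals: halve the interval, find the best admissible index of each half, combine with a strict-< comparison (ties keep the left half); correct because this first-max combine is associative.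
import Mathlib
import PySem

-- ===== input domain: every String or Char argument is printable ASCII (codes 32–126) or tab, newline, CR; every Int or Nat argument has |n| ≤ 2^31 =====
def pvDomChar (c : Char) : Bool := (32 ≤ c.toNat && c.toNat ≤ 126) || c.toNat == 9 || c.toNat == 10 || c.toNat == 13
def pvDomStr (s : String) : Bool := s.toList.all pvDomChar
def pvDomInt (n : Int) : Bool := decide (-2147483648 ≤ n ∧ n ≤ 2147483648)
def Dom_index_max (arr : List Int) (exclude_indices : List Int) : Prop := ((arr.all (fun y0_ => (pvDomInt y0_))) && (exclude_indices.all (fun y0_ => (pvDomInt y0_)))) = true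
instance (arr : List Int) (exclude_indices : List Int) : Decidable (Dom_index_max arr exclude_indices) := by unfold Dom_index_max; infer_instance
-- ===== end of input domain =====

-- B replaces A's single stateful left-to-right best-index scan by a divide-and-conquer
-- recursion on index intervals (halve, solve each half, combine with strict <); same result
-- because the first-max combine is associative. Objective: alternative decomposition.

-- ===== PORT A =====
-- literal port of A's loop: running best_i (Option), the None branch first, then the strict-< update.
-- arr[best_i]/arr[i] ported with pyGetD: both indices come from range(len(arr)), so always in range.
def index_max (arr : List Int) (exclude_indices : List Int) : Option Int :=
  (PySem.List.pyRange 0 (arr.length : Int) 1).foldl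
    (fun best_i i =>
      match best_i with
      | none => if ¬ exclude_indices.contains i then some i else none
      | some b =>
        if PySem.List.pyGetD arr b 0 < PySem.List.pyGetD arr i 0 ∧ ¬ exclude_indices.contains i
        then some i else some b)
    none

-- ===== PORT B =====
-- midpoint of a nontrivial interval is strictly inside it (used only for termination)
theorem pvMid_bounds (lo hi : Int) (h1 : ¬ hi ≤ lo) (h2 : ¬ hi - lo = 1) :
    lo + 1 ≤ PySem.Int.floordiv (lo + hi) 2 ∧ PySem.Int.floordiv (lo + hi) 2 ≤ hi - 1 := by
  rw [PySem.Int.floordiv_eq_ediv_of_pos (by norm_num)]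
  omega

-- literal port of B's helper best(lo, hi): base cases, then recurse on the two halves and combine.
def bestRec (arr : List Int) (exclude_indices : List Int) (lo hi : Int) : Option Int :=
  if h1 : hi ≤ lo then none
  else if h2 : hi - lo = 1 then (if ¬ exclude_indices.contains lo then some lo else none)
  else
    let mid := PySem.Int.floordiv (lo + hi) 2
    let l := bestRec arr exclude_indices lo mid
    let r := bestRec arr exclude_indices mid hi
    match l with
    | none => r
    | some lv =>
      match r with
      | none => some lv
      | some rv =>
        if PySem.List.pyGetD arr lv 0 < PySem.List.pyGetD arr rv 0 then some rv else some lv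
termination_by (hi - lo).toNat
decreasing_by
  · have := pvMid_bounds lo hi h1 h2; omega
  · have := pvMid_bounds lo hi h1 h2; omega

def index_max_alt (arr : List Int) (exclude_indices : List Int) : Option Int :=
  bestRec arr exclude_indices 0 (arr.length : Int)

-- ===== PRECONDITION & SPEC =====
def Spec_index_max (arr : List Int) (exclude_indices : List Int) (out : Option Int) : Prop := out = index_max_alt arr exclude_indices
instance (arr : List Int) (exclude_indices : List Int) (out : Option Int) : Decidable (Spec_index_max arr exclude_indices out) := by unfold Spec_index_max; infer_instance

-- ===== CLAIM (what is proved, stated in full; the proofs are below) =====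
def Claim_equal_index_max : Prop := ∀ (arr : List Int) (exclude_indices : List Int), Dom_index_max arr exclude_indices → Spec_index_max arr exclude_indices (index_max arr exclude_indices)

-- ===== LEMMAS AND PROOFS =====

-- the combine operation both programs use: first-max over optional indices
def oc (arr : List Int) : Option Int → Option Int → Option Int
  | none, r => r
  | some l, none => some l
  | some l, some r =>
    if PySem.List.pyGetD arr l 0 < PySem.List.pyGetD arr r 0 then some r else some l

theorem oc_assoc (arr : List Int) (a b c : Option Int) :
    oc arr (oc arr a b) c = oc arr a (oc arr b c) := by
  cases a with
  | none => rfl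
  | some la =>
    cases b with
    | none => rfl
    | some lb =>
      cases c with
      | none => simp only [oc]; split_ifs <;> rfl
      | some lc =>
        simp only [oc]
        split_ifs <;> simp only [oc] <;> split_ifs <;> first | rfl | (exfalso; omega)

-- an admissible single index as an Option
def gIdx (exclude_indices : List Int) (i : Int) : Option Int :=
  if exclude_indices.contains i then none else some i

-- A's step is exactly 'combine the accumulator with the admissible singleton'
theorem stepA_eq_oc (arr exclude_indices : List Int) :
    (fun (best_i : Option Int) (i : Int) =>
      match best_i with
      | none => if ¬ exclude_indices.contains i then some i else none
      | some b =>
        if PySem.List.pyGetD arr b 0 < PySem.List.pyGetD arr i 0 ∧ ¬ exclude_indices.contains i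
        then some i else some b)
    = fun acc i => oc arr acc (gIdx exclude_indices i) := by
  funext acc i
  cases acc <;> simp only [oc, gIdx] <;> split_ifs <;> simp_all

theorem foldl_oc_none (arr exclude_indices : List Int) (l : List Int) (x : Option Int) :
    l.foldl (fun acc i => oc arr acc (gIdx exclude_indices i)) x
      = oc arr x (l.foldl (fun acc i => oc arr acc (gIdx exclude_indices i)) none) := by
  induction l generalizing x with
  | nil => cases x <;> rfl
  | cons a t ih =>
    simp only [List.foldl_cons]
    rw [ih (oc arr x (gIdx exclude_indices a)), oc_assoc,
        ih (oc arr none (gIdx exclude_indices a))]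
    rfl

-- the divide-and-conquer recursion computes the fold of the combine over the interval
theorem bestRec_eq_foldl (arr exclude_indices : List Int) :
    ∀ (n : Nat) (lo hi : Int), (hi - lo).toNat ≤ n →
      bestRec arr exclude_indices lo hi
        = (PySem.List.pyRange lo hi 1).foldl
            (fun acc i => oc arr acc (gIdx exclude_indices i)) none := by
  intro n
  induction n with
  | zero =>
    intro lo hi h
    have hle : hi ≤ lo := by omega
    rw [bestRec, dif_pos hle, PySem.List.pyRange_one_eq_nil hle]
    rfl
  | succ n ih =>
    intro lo hi h
    by_cases h1 : hi ≤ lo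
    · rw [bestRec, dif_pos h1, PySem.List.pyRange_one_eq_nil h1]
      rfl
    · by_cases h2 : hi - lo = 1
      · rw [bestRec, dif_neg h1, dif_pos h2,
            PySem.List.pyRange_one_cons (by omega), PySem.List.pyRange_one_eq_nil (by omega : hi ≤ lo + 1)]
        simp only [List.foldl_cons, List.foldl_nil, oc, gIdx]
        by_cases hc : exclude_indices.contains lo <;> simp [hc]
      · have hb := pvMid_bounds lo hi h1 h2
        have hunf : bestRec arr exclude_indices lo hi
            = (match bestRec arr exclude_indices lo (PySem.Int.floordiv (lo + hi) 2) with
               | none => bestRec arr exclude_indices (PySem.Int.floordiv (lo + hi) 2) hi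
               | some lv =>
                 match bestRec arr exclude_indices (PySem.Int.floordiv (lo + hi) 2) hi with
                 | none => some lv
                 | some rv =>
                   if PySem.List.pyGetD arr lv 0 < PySem.List.pyGetD arr rv 0 then some rv
                   else some lv) := by
          rw [bestRec, dif_neg h1, dif_neg h2]
        rw [hunf,
            PySem.List.pyRange_one_append lo (PySem.Int.floordiv (lo + hi) 2) hi (by omega) (by omega),
            List.foldl_append, foldl_oc_none,
            ← ih lo (PySem.Int.floordiv (lo + hi) 2) (by omega),
            ← ih (PySem.Int.floordiv (lo + hi) 2) hi (by omega)]
        cases bestRec arr exclude_indices lo (PySem.Int.floordiv (lo + hi) 2) <;>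
          cases bestRec arr exclude_indices (PySem.Int.floordiv (lo + hi) 2) hi <;> rfl

-- ===== VERDICT (by name: the statement is the Claim_ definition above) =====
theorem index_max_spec : Claim_equal_index_max := by
  intro arr exclude_indices _
  unfold Spec_index_max index_max index_max_alt
  rw [stepA_eq_oc, bestRec_eq_foldl arr exclude_indices ((arr.length : Int) - 0).toNat 0 _ le_rfl]
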